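-- pv_equiv track=rewrite | github.com/JanHolubik/warhammer-content-app | scraper_core.py | pick_best_srcset
-- ===== SOURCE A (Python) =====
-- from typing import List, Dict, Optional, Tuple
--
-- def pick_best_srcset(srcset: str) -> Optional[str]:
--     if not srcset:
--         return None
--     parts = []
--     for p in srcset.split(","):
--         p = p.strip()
--         if not p:
--             continue
--         parts.append(p.split(" ")[0].strip())
--     return parts[-1] if parts else None
-- ===== SOURCE B (Python) =====
-- def pick_best_srcset(srcset):
--     # Scan the comma-separated entries from the end and return the first
--     # token of the last non-empty entry; no intermediate list is built.
--     for p in reversed(srcset.split(",")):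
--         p = p.strip()
--         if p:
--             return p.split(" ")[0].strip()
--     return None
-- ===== Notes on version B (the rewrite author's own statement) =====
-- stated objective: simpler
-- what changed: Instead of accumulating every cleaned token in a list and indexing its last element, B walks the comma-split entries in reverse and returns the first token of the first non-empty entry it meets, short-circuiting without any intermediate list (the empty-string guard also disappears).
import Mathlib
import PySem

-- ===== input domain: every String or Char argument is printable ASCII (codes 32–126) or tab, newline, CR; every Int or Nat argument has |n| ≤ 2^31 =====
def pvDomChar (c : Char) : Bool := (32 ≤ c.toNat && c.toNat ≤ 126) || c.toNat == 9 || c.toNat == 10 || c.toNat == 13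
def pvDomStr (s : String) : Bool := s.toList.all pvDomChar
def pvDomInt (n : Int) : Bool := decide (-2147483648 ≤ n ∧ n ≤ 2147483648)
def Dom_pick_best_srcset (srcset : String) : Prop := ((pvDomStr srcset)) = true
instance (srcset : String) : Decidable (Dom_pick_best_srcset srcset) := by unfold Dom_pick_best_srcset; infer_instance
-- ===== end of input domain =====

-- B scans the comma-split entries in reverse and returns on the first non-empty one,
-- instead of accumulating every cleaned token in a list and taking its last element.

-- shared helpers: s.split(",") and p.split(" ")[0] (both separators are non-empty
-- literals, so Python's split never raises; split of any string is non-empty, so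
-- headD's default is never taken)
def pvSplitComma (s : String) : List String :=
  (PySem.Chars.splitOn s.toList [',']).map String.ofList

def pvFirstToken (p : String) : String :=
  String.ofList ((PySem.Chars.splitOn p.toList [' ']).headD [])

-- ===== PORT A =====
def pick_best_srcset (srcset : String) : Option String :=
  if srcset = "" then none
  else
    let parts := (pvSplitComma srcset).foldl (fun acc p =>
      let p := PySem.Str.strip p
      if p = "" then acc
      else acc ++ [PySem.Str.strip (pvFirstToken p)]) []
    if parts = [] then none else PySem.List.pyGet? parts (-1)

-- ===== PORT B =====
def pick_best_srcset_altGo : List String → Option String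
  | [] => none
  | p :: rest =>
      let q := PySem.Str.strip p
      if q = "" then pick_best_srcset_altGo rest
      else some (PySem.Str.strip (pvFirstToken q))

def pick_best_srcset_alt (srcset : String) : Option String :=
  pick_best_srcset_altGo (pvSplitComma srcset).reverse

-- ===== PRECONDITION & SPEC =====
def Spec_pick_best_srcset (srcset : String) (out : Option String) : Prop := out = pick_best_srcset_alt srcset
instance (srcset : String) (out : Option String) : Decidable (Spec_pick_best_srcset srcset out) := by unfold Spec_pick_best_srcset; infer_instance

-- ===== CLAIM (what is proved, stated in full; the proofs are below) =====
def Claim_equal_pick_best_srcset : Prop := ∀ (srcset : String), Dom_pick_best_srcset srcset → Spec_pick_best_srcset srcset (pick_best_srcset srcset)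

-- ===== LEMMAS AND PROOFS =====

-- B's reverse scan distributes over append: the first hit in xs wins.
theorem altGo_append (xs ys : List String) :
    pick_best_srcset_altGo (xs ++ ys)
      = (pick_best_srcset_altGo xs).or (pick_best_srcset_altGo ys) := by
  induction xs with
  | nil => simp [pick_best_srcset_altGo]
  | cons p xs ih =>
    simp only [List.cons_append, pick_best_srcset_altGo]
    split_ifs with h
    · exact ih
    · rfl

-- the loop invariant: the last element of A's accumulated list is B's reverse scan,
-- falling back to the last element of the initial accumulator
theorem foldl_getLast?_eq (L : List String) (acc : List String) :
    (L.foldl (fun acc p =>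
        let p := PySem.Str.strip p
        if p = "" then acc
        else acc ++ [PySem.Str.strip (pvFirstToken p)]) acc).getLast?
      = (pick_best_srcset_altGo L.reverse).or acc.getLast? := by
  induction L generalizing acc with
  | nil => simp [pick_best_srcset_altGo]
  | cons p L ih =>
    simp only [List.foldl_cons, List.reverse_cons, altGo_append, Option.or_assoc]
    rw [ih]
    congr 1
    simp only [pick_best_srcset_altGo]
    split_ifs with h
    · simp
    · simp

-- ===== VERDICT (by name: the statement is the Claim_ definition above) =====
theorem pick_best_srcset_spec : Claim_equal_pick_best_srcset := by
  intro s _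
  unfold Spec_pick_best_srcset pick_best_srcset pick_best_srcset_alt
  by_cases hs : s = ""
  · subst hs; decide
  · simp only [hs, if_false]
    rw [show (if ((pvSplitComma s).foldl (fun acc p =>
        let p := PySem.Str.strip p
        if p = "" then acc
        else acc ++ [PySem.Str.strip (pvFirstToken p)]) [] : List String) = [] then none
        else PySem.List.pyGet? ((pvSplitComma s).foldl (fun acc p =>
        let p := PySem.Str.strip p
        if p = "" then acc
        else acc ++ [PySem.Str.strip (pvFirstToken p)]) []) (-1))
      = ((pvSplitComma s).foldl (fun acc p =>
        let p := PySem.Str.strip p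
        if p = "" then acc
        else acc ++ [PySem.Str.strip (pvFirstToken p)]) []).getLast? from ?_]
    · rw [foldl_getLast?_eq]; simp
    · split_ifs with h
      · simp [h]
      · rw [PySem.List.pyGet?_neg_one]
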